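-- pv_equiv track=rewrite | github.com/ferzkopp/DeepRedAI | scripts/extract_wikipedia.py | format_categories
-- ===== SOURCE A (Python) =====
-- def format_categories(text):
--     """
--     Convert Category:X Category:Y Category:Z format to
--     'Categories: X, Y, Z' format.
--     Categories typically appear at the end of articles without spaces between them.
--     """
--     # Use iterative approach to find and collect consecutive Category: entries
--     # This is more reliable than complex regex for this pattern
--
--     def find_and_replace_categories(text):
--         result = []
--         i = 0
--         text_lower = text.lower()
--
--         while i < len(text):
--             # Look for "Category:" (case-insensitive)
--             cat_start = text_lower.find('category:', i)
--             if cat_start == -1: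
--                 result.append(text[i:])
--                 break
--
--             # Add text before this category
--             result.append(text[i:cat_start])
--
--             # Collect all consecutive categories
--             categories = []
--             pos = cat_start
--
--             while pos < len(text) and text_lower[pos:pos+9] == 'category:':
--                 # Find the end of this category (next Category: or end of string)
--                 cat_name_start = pos + 9
--                 next_cat = text_lower.find('category:', cat_name_start)
--
--                 if next_cat == -1:
--                     # Last category - take until end or whitespace/newline
--                     cat_name = text[cat_name_start:].strip()
--                     categories.append(cat_name)
--                     pos = len(text)
--                 else:
--                     cat_name = text[cat_name_start:next_cat].strip()
--                     categories.append(cat_name)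
--                     pos = next_cat
--
--             # Format categories
--             if len(categories) >= 2:
--                 result.append(' Categories: ' + ', '.join(categories) + ' ')
--             else:
--                 # Single category, keep original
--                 for cat in categories:
--                     result.append(f'Category:{cat}')
--
--             i = pos
--
--         return ''.join(result)
--
--     return find_and_replace_categories(text)
-- ===== SOURCE B (Python) =====
-- import re
--
-- def format_categories(text):
--     parts = re.split('category:', text, flags=re.IGNORECASE)
--     if len(parts) == 1:
--         return text
--     cats = [p.strip() for p in parts[1:]]
--     if len(cats) >= 2:
--         return parts[0] + ' Categories: ' + ', '.join(cats) + ' '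
--     return parts[0] + 'Category:' + cats[0]
-- ===== Notes on version B (the rewrite author's own statement) =====
-- stated objective: simpler
-- what changed: B replaces A's nested index-scanning while-loops (outer find loop plus inner category-collecting loop over string indices) with one case-insensitive regex split of the whole text followed by a single flat branch on the number of pieces.
import Mathlib
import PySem

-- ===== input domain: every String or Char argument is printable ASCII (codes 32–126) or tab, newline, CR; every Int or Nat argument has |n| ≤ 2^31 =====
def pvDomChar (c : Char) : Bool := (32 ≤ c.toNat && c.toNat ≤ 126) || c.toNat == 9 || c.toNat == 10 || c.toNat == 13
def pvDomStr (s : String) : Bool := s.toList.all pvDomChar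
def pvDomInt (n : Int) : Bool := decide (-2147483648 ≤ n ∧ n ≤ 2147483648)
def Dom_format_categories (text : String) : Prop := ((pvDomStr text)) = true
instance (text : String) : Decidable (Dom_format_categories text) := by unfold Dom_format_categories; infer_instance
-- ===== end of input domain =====

-- B reformats the text by one case-insensitive split on 'category:' followed by a single flat
-- branch, replacing A's nested index-scanning while-loops (objective: simpler).

-- shared string literals of the two programs
def pvCatPat : List Char := ['c','a','t','e','g','o','r','y',':']
def pvCatPrefix : List Char := ['C','a','t','e','g','o','r','y',':']
def pvCatsHdr : List Char := [' ','C','a','t','e','g','o','r','i','e','s',':',' ']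
def pvCommaSep : List Char := [',',' ']

-- ===== PORT A =====
-- inner while-loop of A: collect the consecutive categories starting at pos; returns (categories, pos).
-- The loop advances pos by at least 9 each iteration, so fuel t.length + 1 is provably sufficient
-- (pvInnerAGo_irrel below); the fuel only makes the recursion structural, it never cuts a run short.
def pvInnerAGo : Nat → List Char → Nat → List (List Char) → List (List Char) × Nat
  | 0, _, pos, cats => (cats, pos)
  | fuel + 1, t, pos, cats =>
    if pos < t.length ∧ PySem.Chars.slice (PySem.Chars.lower t) (some (pos : Int)) (some ((pos + 9 : Nat) : Int)) = pvCatPat then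
      let next := PySem.Chars.findFrom (PySem.Chars.lower t) pvCatPat ((pos + 9 : Nat) : Int)
      if next = -1 then
        (cats ++ [PySem.Chars.strip (PySem.Chars.slice t (some ((pos + 9 : Nat) : Int)) none)], t.length)
      else
        pvInnerAGo fuel t next.toNat
          (cats ++ [PySem.Chars.strip (PySem.Chars.slice t (some ((pos + 9 : Nat) : Int)) (some next))])
    else (cats, pos)

def pvInnerA (t : List Char) (pos : Nat) (cats : List (List Char)) : List (List Char) × Nat :=
  pvInnerAGo (t.length + 1) t pos cats

-- outer while-loop of A (same fuel device: i strictly grows by ≥ 9 per iteration)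
def pvOuterAGo : Nat → List Char → Nat → List (List Char) → List (List Char)
  | 0, _, _, result => result
  | fuel + 1, t, i, result =>
    if i < t.length then
      let cs := PySem.Chars.findFrom (PySem.Chars.lower t) pvCatPat (i : Int)
      if cs = -1 then result ++ [PySem.Chars.slice t (some (i : Int)) none]
      else
        let r := pvInnerA t cs.toNat []
        pvOuterAGo fuel t r.2 (result ++ [PySem.Chars.slice t (some (i : Int)) (some cs)] ++
          (if 2 ≤ r.1.length then [pvCatsHdr ++ PySem.Chars.join pvCommaSep r.1 ++ [' ']]
           else r.1.map (fun c => pvCatPrefix ++ c)))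
    else result

def pvOuterA (t : List Char) (i : Nat) (result : List (List Char)) : List (List Char) :=
  pvOuterAGo (t.length + 1) t i result

def format_categories (text : String) : String :=
  String.ofList (PySem.Chars.join [] (pvOuterA text.toList 0 []))

-- ===== PORT B =====
-- hand port of re.split('category:', s, flags=re.IGNORECASE): split s at each case-insensitive
-- occurrence of the 9-character literal pattern (exact on the ASCII domain). Each split consumes
-- at least 9 characters, so fuel s.length is provably sufficient (pvSplitCIGo_irrel below).
def pvSplitCIGo : Nat → List Char → List (List Char)
  | 0, s => [s]
  | fuel + 1, s =>
    let f := PySem.Chars.find (PySem.Chars.lower s) pvCatPat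
    if f = -1 then [s]
    else s.take f.toNat :: pvSplitCIGo fuel (s.drop (f.toNat + 9))

def pvSplitCI (s : List Char) : List (List Char) := pvSplitCIGo s.length s

def format_categories_alt (text : String) : String :=
  let parts := pvSplitCI text.toList
  if parts.length = 1 then text
  else
    let cats := (parts.drop 1).map PySem.Chars.strip
    if 2 ≤ cats.length then
      String.ofList (parts.headD [] ++ pvCatsHdr ++ PySem.Chars.join pvCommaSep cats ++ [' '])
    else
      String.ofList (parts.headD [] ++ pvCatPrefix ++ cats.headD [])

-- ===== PRECONDITION & SPEC =====
def Spec_format_categories (text : String) (out : String) : Prop := out = format_categories_alt text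
instance (text : String) (out : String) : Decidable (Spec_format_categories text out) := by unfold Spec_format_categories; infer_instance

-- ===== CLAIM (what is proved, stated in full; the proofs are below) =====
def Claim_equal_format_categories : Prop := ∀ (text : String), Dom_format_categories text → Spec_format_categories text (format_categories text)

-- ===== LEMMAS AND PROOFS =====

theorem pvLowerLen (t : List Char) : (PySem.Chars.lower t).length = t.length := by
  simp [PySem.Chars.lower]

-- lower commutes with drop
theorem pvLowerDrop (t : List Char) (k : Nat) :
    PySem.Chars.lower (t.drop k) = (PySem.Chars.lower t).drop k := by
  simp [PySem.Chars.lower, List.map_drop]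

theorem pvGuardLen (t : List Char) (pos : Nat)
    (h : PySem.Chars.slice (PySem.Chars.lower t) (some (pos : Int)) (some ((pos + 9 : Nat) : Int)) = pvCatPat) :
    pos + 9 ≤ t.length := by
  have hl := congrArg List.length h
  rw [PySem.Chars.slice_eq_listSlice, PySem.List.slice_natCast] at hl
  simp only [List.length_take, List.length_drop, pvLowerLen, pvCatPat, List.length_cons,
    List.length_nil] at hl
  omega

-- pattern found at p ⇒ the inner-loop guard's slice test holds there
theorem pvPrefixSlice (lo : List Char) (p : Nat) (h : pvCatPat <+: lo.drop p) :
    PySem.Chars.slice lo (some (p : Int)) (some ((p + 9 : Nat) : Int)) = pvCatPat := by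
  rw [PySem.Chars.slice_eq_listSlice, PySem.List.slice_natCast]
  have h9 : p + 9 - p = 9 := by omega
  rw [h9]
  have := List.prefix_iff_eq_take.mp h
  simpa [pvCatPat] using this.symm

-- when the inner-loop guard holds, the next scan position is ≥ pos + 9
theorem pvNextGe (t : List Char) (pos : Nat)
    (h : pos < t.length ∧ PySem.Chars.slice (PySem.Chars.lower t) (some (pos : Int)) (some ((pos + 9 : Nat) : Int)) = pvCatPat)
    (hn : ¬ PySem.Chars.findFrom (PySem.Chars.lower t) pvCatPat ((pos + 9 : Nat) : Int) = -1) :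
    pos + 9 ≤ (PySem.Chars.findFrom (PySem.Chars.lower t) pvCatPat ((pos + 9 : Nat) : Int)).toNat := by
  have h9 : pos + 9 ≤ (PySem.Chars.lower t).length := by
    rw [pvLowerLen]; exact pvGuardLen t pos h.2
  have hs := (PySem.Chars.findFrom_natCast_spec (PySem.Chars.lower t) pvCatPat (pos + 9) h9 hn).1
  omega

-- any fuel above the remaining distance computes the same inner-loop result
theorem pvInnerAGo_irrel : ∀ (f1 f2 : Nat) (t : List Char) (pos : Nat) (cats : List (List Char)),
    t.length - pos < f1 → t.length - pos < f2 →
    pvInnerAGo f1 t pos cats = pvInnerAGo f2 t pos cats := by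
  intro f1
  induction f1 with
  | zero => intro f2 t pos cats h1; omega
  | succ f1 ih =>
    intro f2 t pos cats h1 h2
    cases f2 with
    | zero => omega
    | succ f2 =>
      simp only [pvInnerAGo]
      by_cases hg : pos < t.length ∧ PySem.Chars.slice (PySem.Chars.lower t) (some (pos : Int)) (some ((pos + 9 : Nat) : Int)) = pvCatPat
      · rw [if_pos hg, if_pos hg]
        by_cases hn : PySem.Chars.findFrom (PySem.Chars.lower t) pvCatPat ((pos + 9 : Nat) : Int) = -1
        · rw [if_pos hn, if_pos hn]
        · rw [if_neg hn, if_neg hn]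
          have hnext := pvNextGe t pos hg hn
          have hguard := pvGuardLen t pos hg.2
          apply ih f2 t
          · omega
          · omega
      · rw [if_neg hg, if_neg hg]

-- one-step unfolding of the inner loop (what A's while-loop body does)
theorem pvInnerA_eq (t : List Char) (pos : Nat) (cats : List (List Char)) :
    pvInnerA t pos cats =
      if pos < t.length ∧ PySem.Chars.slice (PySem.Chars.lower t) (some (pos : Int)) (some ((pos + 9 : Nat) : Int)) = pvCatPat then
        (if PySem.Chars.findFrom (PySem.Chars.lower t) pvCatPat ((pos + 9 : Nat) : Int) = -1 then
          (cats ++ [PySem.Chars.strip (PySem.Chars.slice t (some ((pos + 9 : Nat) : Int)) none)], t.length)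
        else
          pvInnerA t (PySem.Chars.findFrom (PySem.Chars.lower t) pvCatPat ((pos + 9 : Nat) : Int)).toNat
            (cats ++ [PySem.Chars.strip (PySem.Chars.slice t (some ((pos + 9 : Nat) : Int)) (some (PySem.Chars.findFrom (PySem.Chars.lower t) pvCatPat ((pos + 9 : Nat) : Int))))]))
      else (cats, pos) := by
  unfold pvInnerA
  conv_lhs => rw [pvInnerAGo]
  simp only []
  by_cases hg : pos < t.length ∧ PySem.Chars.slice (PySem.Chars.lower t) (some (pos : Int)) (some ((pos + 9 : Nat) : Int)) = pvCatPat
  · rw [if_pos hg, if_pos hg]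
    by_cases hn : PySem.Chars.findFrom (PySem.Chars.lower t) pvCatPat ((pos + 9 : Nat) : Int) = -1
    · rw [if_pos hn, if_pos hn]
    · rw [if_neg hn, if_neg hn]
      have hnext := pvNextGe t pos hg hn
      have hguard := pvGuardLen t pos hg.2
      apply pvInnerAGo_irrel
      · omega
      · omega
  · rw [if_neg hg, if_neg hg]

theorem pvInnerAGo_snd_ge : ∀ (fuel : Nat) (t : List Char) (pos : Nat) (cats : List (List Char)),
    pos ≤ (pvInnerAGo fuel t pos cats).2 := by
  intro fuel
  induction fuel with
  | zero => intro t pos cats; exact le_refl _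
  | succ fuel ih =>
    intro t pos cats
    simp only [pvInnerAGo]
    by_cases hg : pos < t.length ∧ PySem.Chars.slice (PySem.Chars.lower t) (some (pos : Int)) (some ((pos + 9 : Nat) : Int)) = pvCatPat
    · rw [if_pos hg]
      by_cases hn : PySem.Chars.findFrom (PySem.Chars.lower t) pvCatPat ((pos + 9 : Nat) : Int) = -1
      · rw [if_pos hn]; exact hg.1.le
      · rw [if_neg hn]
        have hnext := pvNextGe t pos hg hn
        have := ih t (PySem.Chars.findFrom (PySem.Chars.lower t) pvCatPat ((pos + 9 : Nat) : Int)).toNat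
          (cats ++ [PySem.Chars.strip (PySem.Chars.slice t (some ((pos + 9 : Nat) : Int)) (some (PySem.Chars.findFrom (PySem.Chars.lower t) pvCatPat ((pos + 9 : Nat) : Int))))])
        omega
    · rw [if_neg hg]

-- when the guard holds at entry, the loop moves pos forward by at least 9
theorem pvInnerA_snd_gt (t : List Char) (pos : Nat) (cats : List (List Char))
    (h : pos < t.length ∧ PySem.Chars.slice (PySem.Chars.lower t) (some (pos : Int)) (some ((pos + 9 : Nat) : Int)) = pvCatPat) :
    pos + 9 ≤ (pvInnerA t pos cats).2 := by
  rw [pvInnerA_eq, if_pos h]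
  by_cases hn : PySem.Chars.findFrom (PySem.Chars.lower t) pvCatPat ((pos + 9 : Nat) : Int) = -1
  · rw [if_pos hn]; exact pvGuardLen t pos h.2
  · rw [if_neg hn]
    have hnext := pvNextGe t pos h hn
    have := pvInnerAGo_snd_ge (t.length + 1) t (PySem.Chars.findFrom (PySem.Chars.lower t) pvCatPat ((pos + 9 : Nat) : Int)).toNat
      (cats ++ [PySem.Chars.strip (PySem.Chars.slice t (some ((pos + 9 : Nat) : Int)) (some (PySem.Chars.findFrom (PySem.Chars.lower t) pvCatPat ((pos + 9 : Nat) : Int))))])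
    unfold pvInnerA
    omega

-- any fuel above the remaining distance computes the same outer-loop result
theorem pvOuterAGo_irrel : ∀ (f1 f2 : Nat) (t : List Char) (i : Nat) (result : List (List Char)),
    t.length - i < f1 → t.length - i < f2 →
    pvOuterAGo f1 t i result = pvOuterAGo f2 t i result := by
  intro f1
  induction f1 with
  | zero => intro f2 t i result h1; omega
  | succ f1 ih =>
    intro f2 t i result h1 h2
    cases f2 with
    | zero => omega
    | succ f2 =>
      simp only [pvOuterAGo]
      by_cases hi : i < t.length
      · rw [if_pos hi, if_pos hi]
        by_cases hcs : PySem.Chars.findFrom (PySem.Chars.lower t) pvCatPat (i : Int) = -1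
        · rw [if_pos hcs, if_pos hcs]
        · rw [if_neg hcs, if_neg hcs]
          have hil : i ≤ (PySem.Chars.lower t).length := by rw [pvLowerLen]; omega
          have hs := PySem.Chars.findFrom_natCast_spec (PySem.Chars.lower t) pvCatPat i hil hcs
          have hpre := hs.2.1
          have hguard := pvInnerA_snd_gt t (PySem.Chars.findFrom (PySem.Chars.lower t) pvCatPat (i : Int)).toNat []
            ⟨by
              have hlen := hpre.length_le
              simp only [List.length_drop, pvLowerLen, show pvCatPat.length = 9 from rfl] at hlen
              omega, pvPrefixSlice _ _ hpre⟩
          have hge := hs.1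
          apply ih f2 t
          · omega
          · omega
      · rw [if_neg hi, if_neg hi]

-- one-step unfolding of the outer loop
theorem pvOuterA_eq (t : List Char) (i : Nat) (result : List (List Char)) :
    pvOuterA t i result =
      if i < t.length then
        (if PySem.Chars.findFrom (PySem.Chars.lower t) pvCatPat (i : Int) = -1 then
          result ++ [PySem.Chars.slice t (some (i : Int)) none]
        else
          pvOuterA t (pvInnerA t (PySem.Chars.findFrom (PySem.Chars.lower t) pvCatPat (i : Int)).toNat []).2
            (result ++ [PySem.Chars.slice t (some (i : Int)) (some (PySem.Chars.findFrom (PySem.Chars.lower t) pvCatPat (i : Int)))] ++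
             (if 2 ≤ (pvInnerA t (PySem.Chars.findFrom (PySem.Chars.lower t) pvCatPat (i : Int)).toNat []).1.length then
               [pvCatsHdr ++ PySem.Chars.join pvCommaSep (pvInnerA t (PySem.Chars.findFrom (PySem.Chars.lower t) pvCatPat (i : Int)).toNat []).1 ++ [' ']]
              else (pvInnerA t (PySem.Chars.findFrom (PySem.Chars.lower t) pvCatPat (i : Int)).toNat []).1.map (fun c => pvCatPrefix ++ c))))
      else result := by
  unfold pvOuterA
  conv_lhs => rw [pvOuterAGo]
  simp only []
  by_cases hi : i < t.length
  · rw [if_pos hi, if_pos hi]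
    by_cases hcs : PySem.Chars.findFrom (PySem.Chars.lower t) pvCatPat (i : Int) = -1
    · rw [if_pos hcs, if_pos hcs]
    · rw [if_neg hcs, if_neg hcs]
      have hil : i ≤ (PySem.Chars.lower t).length := by rw [pvLowerLen]; omega
      have hs := PySem.Chars.findFrom_natCast_spec (PySem.Chars.lower t) pvCatPat i hil hcs
      have hpre := hs.2.1
      have hguard := pvInnerA_snd_gt t (PySem.Chars.findFrom (PySem.Chars.lower t) pvCatPat (i : Int)).toNat []
        ⟨by
          have hlen := hpre.length_le
          simp only [List.length_drop, pvLowerLen, show pvCatPat.length = 9 from rfl] at hlen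
          omega, pvPrefixSlice _ _ hpre⟩
      have hge := hs.1
      apply pvOuterAGo_irrel
      · omega
      · omega
  · rw [if_neg hi, if_neg hi]

-- the pattern does not occur in the empty string
theorem pvFindNil : PySem.Chars.find (PySem.Chars.lower []) pvCatPat = -1 := by decide

-- any fuel above the string length computes the same split
theorem pvSplitCIGo_irrel : ∀ (f1 f2 : Nat) (s : List Char),
    s.length ≤ f1 → s.length ≤ f2 → pvSplitCIGo f1 s = pvSplitCIGo f2 s := by
  intro f1
  induction f1 with
  | zero =>
    intro f2 s h1 h2
    have hs : s = [] := List.length_eq_zero_iff.mp (by omega)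
    subst hs
    cases f2 with
    | zero => rfl
    | succ f2 => simp only [pvSplitCIGo]; rw [if_pos pvFindNil]
  | succ f1 ih =>
    intro f2 s h1 h2
    cases f2 with
    | zero =>
      have hs : s = [] := List.length_eq_zero_iff.mp (by omega)
      subst hs
      simp only [pvSplitCIGo]; rw [if_pos pvFindNil]
    | succ f2 =>
      simp only [pvSplitCIGo]
      by_cases hf : PySem.Chars.find (PySem.Chars.lower s) pvCatPat = -1
      · rw [if_pos hf, if_pos hf]
      · rw [if_neg hf, if_neg hf]
        have : (s.drop ((PySem.Chars.find (PySem.Chars.lower s) pvCatPat).toNat + 9)).length ≤ f1 := by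
          simp only [List.length_drop]; omega
        have h2' : (s.drop ((PySem.Chars.find (PySem.Chars.lower s) pvCatPat).toNat + 9)).length ≤ f2 := by
          simp only [List.length_drop]; omega
        rw [ih _ _ this h2']

-- one-step unfolding of B's splitter
theorem pvSplitCI_eq (s : List Char) :
    pvSplitCI s =
      if PySem.Chars.find (PySem.Chars.lower s) pvCatPat = -1 then [s]
      else s.take (PySem.Chars.find (PySem.Chars.lower s) pvCatPat).toNat ::
        pvSplitCI (s.drop ((PySem.Chars.find (PySem.Chars.lower s) pvCatPat).toNat + 9)) := by
  unfold pvSplitCI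
  cases hl : s.length with
  | zero =>
    have hs : s = [] := List.length_eq_zero_iff.mp hl
    subst hs
    simp only [pvSplitCIGo]
    rw [if_pos pvFindNil]
  | succ n =>
    simp only [pvSplitCIGo]
    by_cases hf : PySem.Chars.find (PySem.Chars.lower s) pvCatPat = -1
    · rw [if_pos hf, if_pos hf]
    · rw [if_neg hf, if_neg hf]
      have : (s.drop ((PySem.Chars.find (PySem.Chars.lower s) pvCatPat).toNat + 9)).length ≤ n := by
        simp only [List.length_drop]; omega
      rw [pvSplitCIGo_irrel n _ _ this (le_refl _)]

theorem pvSplitCI_ne_nil (s : List Char) : pvSplitCI s ≠ [] := by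
  rw [pvSplitCI_eq]; split <;> simp

-- A's inner loop collects exactly the strip-mapped tail pieces of B's splitter, ending at the end of the text
theorem pvInnerA_eq_split (t : List Char) : ∀ (n pos : Nat) (cats : List (List Char)),
    t.length - pos ≤ n →
    pvCatPat <+: (PySem.Chars.lower t).drop pos →
    pvInnerA t pos cats =
      (cats ++ (pvSplitCI (t.drop (pos + 9))).map PySem.Chars.strip, t.length) := by
  intro n
  induction n with
  | zero =>
    intro pos cats h0 hpre
    have h9 : pvCatPat.length ≤ ((PySem.Chars.lower t).drop pos).length := hpre.length_le
    simp only [List.length_drop, pvLowerLen, pvCatPat, List.length_cons, List.length_nil] at h9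
    omega
  | succ n ih =>
    intro pos cats hn hpre
    have h9 : pvCatPat.length ≤ ((PySem.Chars.lower t).drop pos).length := hpre.length_le
    simp only [List.length_drop, pvLowerLen, pvCatPat, List.length_cons, List.length_nil] at h9
    have h9' : pos + 9 ≤ (PySem.Chars.lower t).length := by rw [pvLowerLen]; omega
    have hguard : pos < t.length ∧
        PySem.Chars.slice (PySem.Chars.lower t) (some (pos : Int)) (some ((pos + 9 : Nat) : Int)) = pvCatPat :=
      ⟨by omega, pvPrefixSlice _ _ hpre⟩
    rw [pvInnerA_eq, if_pos hguard]
    rw [PySem.Chars.findFrom_natCast _ _ _ h9']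
    rw [pvSplitCI_eq]
    simp only [pvLowerDrop]
    by_cases hg : PySem.Chars.find ((PySem.Chars.lower t).drop (pos + 9)) pvCatPat = -1
    · rw [if_pos hg, if_pos hg, if_pos (show (-1 : Int) = -1 from rfl)]
      rw [PySem.Chars.slice_eq_listSlice, PySem.List.slice_from_natCast]
      simp
    · rw [if_neg hg, if_neg hg]
      have hg0 : 0 ≤ PySem.Chars.find ((PySem.Chars.lower t).drop (pos + 9)) pvCatPat := by
        have := PySem.Chars.neg_one_le_find ((PySem.Chars.lower t).drop (pos + 9)) pvCatPat
        omega
      set g := PySem.Chars.find ((PySem.Chars.lower t).drop (pos + 9)) pvCatPat with hgdef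
      have hne : ¬ ((pos + 9 : Nat) : Int) + g = -1 := by omega
      rw [if_neg hne]
      have hcast : ((pos + 9 : Nat) : Int) + g = ((pos + 9 + g.toNat : Nat) : Int) := by
        push_cast; omega
      have htoNat : (((pos + 9 : Nat) : Int) + g).toNat = pos + 9 + g.toNat := by omega
      -- the next occurrence carries the pattern
      have hpre' : pvCatPat <+: (PySem.Chars.lower t).drop (pos + 9 + g.toNat) := by
        have hs := (PySem.Chars.find_spec (sub := pvCatPat) hg0).1
        rw [← hgdef, List.drop_drop] at hs
        exact hs
      have hrec := ih (pos + 9 + g.toNat) (cats ++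
        [PySem.Chars.strip (PySem.Chars.slice t (some ((pos + 9 : Nat) : Int)) (some (((pos + 9 : Nat) : Int) + g)))])
        (by omega) hpre'
      rw [htoNat, hrec]
      rw [hcast, PySem.Chars.slice_eq_listSlice, PySem.List.slice_natCast]
      have e1 : pos + 9 + g.toNat - (pos + 9) = g.toNat := by omega
      have e2 : (t.drop (pos + 9)).drop (g.toNat + 9) = t.drop (pos + 9 + g.toNat + 9) := by
        rw [List.drop_drop]; congr 1
      rw [e1, e2]
      simp

-- the two top-level programs agree
theorem pvMain (text : String) : format_categories text = format_categories_alt text := by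
  unfold format_categories format_categories_alt
  simp only []
  by_cases hf : PySem.Chars.find (PySem.Chars.lower text.toList) pvCatPat = -1
  · -- no occurrence of the pattern: both sides return the text unchanged
    have hB : pvSplitCI text.toList = [text.toList] := by
      rw [pvSplitCI_eq]; rw [if_pos hf]
    rw [hB]
    rw [if_pos (show ([text.toList] : List (List Char)).length = 1 from rfl)]
    rw [pvOuterA_eq]
    by_cases h0 : 0 < text.toList.length
    · rw [if_pos h0]
      have hcs : PySem.Chars.findFrom (PySem.Chars.lower text.toList) pvCatPat ((0 : Nat) : Int) = -1 := by
        simpa using hf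
      rw [if_pos hcs]
      rw [PySem.Chars.slice_eq_listSlice, PySem.List.slice_from_natCast]
      simp [PySem.Chars.join_singleton, String.ofList_toList]
    · rw [if_neg h0]
      have ht : text.toList = [] := by
        cases h : text.toList <;> simp [h] at h0 ⊢
      rw [PySem.Chars.join_nil]
      conv_rhs => rw [← (String.ofList_toList : String.ofList text.toList = text)]
      rw [ht]
  · -- at least one occurrence
    have hg0 : 0 ≤ PySem.Chars.find (PySem.Chars.lower text.toList) pvCatPat := by
      have := PySem.Chars.neg_one_le_find (PySem.Chars.lower text.toList) pvCatPat
      omega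
    set c := (PySem.Chars.find (PySem.Chars.lower text.toList) pvCatPat).toNat with hc
    have hfc : PySem.Chars.find (PySem.Chars.lower text.toList) pvCatPat = (c : Int) := by omega
    have hpre : pvCatPat <+: (PySem.Chars.lower text.toList).drop c :=
      (PySem.Chars.find_spec hg0).1
    have hlen : c + 9 ≤ text.toList.length := by
      have h9 := hpre.length_le
      simp only [List.length_drop, pvLowerLen, pvCatPat, List.length_cons, List.length_nil] at h9
      omega
    -- A side
    rw [pvOuterA_eq, if_pos (show 0 < text.toList.length by omega)]
    have hcs : PySem.Chars.findFrom (PySem.Chars.lower text.toList) pvCatPat ((0 : Nat) : Int) = (c : Int) := by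
      simpa using hfc
    rw [hcs, if_neg (show ¬((c : Nat) : Int) = -1 by omega)]
    simp only [Int.toNat_natCast]
    rw [pvInnerA_eq_split text.toList text.toList.length c [] (by omega) hpre]
    simp only [List.nil_append]
    rw [pvOuterA_eq, if_neg (lt_irrefl _)]
    -- B side
    conv_rhs => rw [pvSplitCI_eq]
    rw [if_neg hf, hfc]
    simp only [Int.toNat_natCast]
    have hnil := pvSplitCI_ne_nil (text.toList.drop (c + 9))
    have hlen1 : ¬ (List.take c text.toList :: pvSplitCI (text.toList.drop (c + 9))).length = 1 := by
      simp only [List.length_cons]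
      intro hone
      exact hnil (List.length_eq_zero_iff.mp (by omega))
    rw [if_neg hlen1]
    simp only [List.drop_one, List.tail_cons, List.headD_cons]
    rw [PySem.Chars.slice_eq_listSlice, PySem.List.slice_natCast]
    simp only [Nat.sub_zero, List.drop_zero]
    by_cases h2 : 2 ≤ (List.map PySem.Chars.strip (pvSplitCI (text.toList.drop (c + 9)))).length
    · rw [if_pos h2, if_pos h2]
      simp only [List.singleton_append]
      rw [PySem.Chars.join_cons_cons, PySem.Chars.join_singleton]
      simp [List.append_assoc]
    · rw [if_neg h2, if_neg h2]
      have h1 : (List.map PySem.Chars.strip (pvSplitCI (text.toList.drop (c + 9)))).length = 1 := by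
        have hpos : 0 < (pvSplitCI (text.toList.drop (c + 9))).length := List.length_pos_iff.mpr hnil
        simp only [List.length_map] at h2 ⊢
        omega
      obtain ⟨x, hx⟩ := List.length_eq_one_iff.mp h1
      rw [hx]
      rw [List.map_cons, List.map_nil]
      simp only [List.singleton_append]
      rw [PySem.Chars.join_cons_cons, PySem.Chars.join_singleton]
      simp [List.append_assoc]

-- ===== VERDICT (by name: the statement is the Claim_ definition above) =====
theorem format_categories_spec : Claim_equal_format_categories := by
  unfold Claim_equal_format_categories Spec_format_categories
  intro text _
  exact pvMain text
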